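-- pv_equiv track=rewrite | github.com/bayekislove/University | Python/WdPP/Pracownia 8/slowa_ukladalne.py | sprawdzacz
-- ===== SOURCE A (Python) =====
-- def slowo_slownik(k):
--     literki = {}
--     for i in range(len(k)):
--         if k[i] in literki.keys():
--             literki[k[i]] += 1
--         else:
--             literki[k[i]] = 1
--     return literki
--
-- def sprawdzacz(pier, dr): #z pierwszego ukladamy drugie
--     pierwsze = slowo_slownik(pier)
--     drugie = slowo_slownik(dr)
--     if len(pier) < len(dr):
--         return False
--     else:
--         for el in drugie.keys():
--             if el not in pierwsze.keys():
--                 return False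
--             elif pierwsze[el] < drugie[el]:
--                 return False
--     return True
-- ===== SOURCE B (Python) =====
-- def sprawdzacz(pier, dr):
--     p = sorted(pier)
--     d = sorted(dr)
--     i = 0
--     for c in d:
--         while i < len(p) and p[i] < c:
--             i += 1
--         if i == len(p) or p[i] != c:
--             return False
--         i += 1
--     return True
-- ===== Notes on version B (the rewrite author's own statement) =====
-- stated objective: alternative
-- what changed: Drops the frequency dictionaries entirely: B sorts both words and runs a two-pointer merge scan, matching each letter of the sorted dr against the sorted pier pool, with no counting and no length comparison anywhere.
import Mathlib
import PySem

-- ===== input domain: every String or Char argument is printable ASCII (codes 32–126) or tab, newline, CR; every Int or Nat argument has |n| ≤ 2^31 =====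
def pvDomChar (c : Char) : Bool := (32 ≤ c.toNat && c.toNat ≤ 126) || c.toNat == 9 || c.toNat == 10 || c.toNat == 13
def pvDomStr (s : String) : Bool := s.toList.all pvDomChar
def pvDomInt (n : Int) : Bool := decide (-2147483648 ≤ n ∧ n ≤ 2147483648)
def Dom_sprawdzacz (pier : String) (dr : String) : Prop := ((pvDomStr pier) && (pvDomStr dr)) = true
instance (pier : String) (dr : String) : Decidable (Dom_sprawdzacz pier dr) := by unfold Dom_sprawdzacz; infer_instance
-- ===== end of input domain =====

-- B replaces A's two frequency dictionaries with a sort-and-merge algorithm: both words are sorted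
-- and a two-pointer scan matches each letter of sorted dr against the sorted pier pool (objective: alternative).

-- ===== PORT A =====
def slowoSlownik (k : String) : PySem.Dict Char Int :=
  (PySem.List.pyRange 0 (PySem.Str.len k)).foldl
    (fun literki i =>
      if literki.contains (PySem.List.pyGetD k.toList i ' ') then
        literki.insert (PySem.List.pyGetD k.toList i ' ')
          (literki.getD (PySem.List.pyGetD k.toList i ' ') 0 + 1)
      else literki.insert (PySem.List.pyGetD k.toList i ' ') 1)
    PySem.Dict.empty

def sprawdzacz (pier : String) (dr : String) : Bool :=
  let pierwsze := slowoSlownik pier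
  let drugie := slowoSlownik dr
  if PySem.Str.len pier < PySem.Str.len dr then false
  else drugie.keys.all (fun el =>
    if !pierwsze.contains el then false
    else if pierwsze.getD el 0 < drugie.getD el 0 then false
    else true)

-- ===== PORT B =====
-- B's two-pointer merge loop: the pointer i into the sorted pier is represented by the remaining
-- suffix of p; 'q < c → recurse on ps' is the inner while advancing i, 'q = c' consumes the match.
def sprGo (p : List Char) (d : List Char) : Bool :=
  match p, d with
  | _, [] => true
  | [], _ :: _ => false
  | q :: ps, c :: cs =>
    if q < c then sprGo ps (c :: cs)
    else if q = c then sprGo ps cs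
    else false

def sprawdzacz_alt (pier : String) (dr : String) : Bool :=
  sprGo (PySem.List.sorted pier.toList (fun x => x) false)
        (PySem.List.sorted dr.toList (fun x => x) false)

-- ===== PRECONDITION & SPEC =====
def Spec_sprawdzacz (pier : String) (dr : String) (out : Bool) : Prop := out = sprawdzacz_alt pier dr
instance (pier : String) (dr : String) (out : Bool) : Decidable (Spec_sprawdzacz pier dr out) := by unfold Spec_sprawdzacz; infer_instance

-- ===== CLAIM (what is proved, stated in full; the proofs are below) =====
def Claim_equal_sprawdzacz : Prop := ∀ (pier : String) (dr : String), Dom_sprawdzacz pier dr → Spec_sprawdzacz pier dr (sprawdzacz pier dr)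

-- ===== LEMMAS AND PROOFS =====

-- A's counting loop builds exactly collections.Counter of the string's characters.
theorem slowoSlownik_eq_counter (k : String) :
    slowoSlownik k = PySem.Dict.counter k.toList := by
  unfold slowoSlownik
  have hlen : PySem.Str.len k = PySem.List.len k.toList := by
    simp [PySem.Str.len_eq, PySem.List.len_eq]
  rw [hlen]
  refine Eq.trans (PySem.List.foldl_pyRange_pyGetD k.toList ' '
      (fun (literki : PySem.Dict Char Int) c =>
        if literki.contains c then literki.insert c (literki.getD c 0 + 1)
        else literki.insert c 1) PySem.Dict.empty le_rfl) ?_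
  simp only [Int.toNat_zero, List.drop_zero]
  rw [← PySem.Dict.foldl_insert_getD_add_one_eq_counter]
  congr 1
  funext d c
  by_cases h : d.contains c
  · simp [h]
  · simp only [Bool.not_eq_true] at h
    simp [h, PySem.Dict.getD_of_not_contains d 0 h]

-- On sorted inputs, B's merge scan succeeds exactly when every character occurs in the pool at
-- least as often as in the word.
theorem sprGo_eq_true_iff (p : List Char) : ∀ (d : List Char),
    p.Pairwise (· ≤ ·) → d.Pairwise (· ≤ ·) →
    (sprGo p d = true ↔ ∀ x, d.count x ≤ p.count x) := by
  induction p with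
  | nil =>
    intro d _ _
    cases d with
    | nil => simp [sprGo]
    | cons c cs =>
      simp only [sprGo, Bool.false_eq_true, false_iff, not_forall, not_le]
      exact ⟨c, by simp⟩
  | cons q ps ih =>
    intro d hp hd
    cases d with
    | nil => simp [sprGo]
    | cons c cs =>
      have hps : ps.Pairwise (· ≤ ·) := hp.tail
      unfold sprGo
      by_cases hqc : q < c
      · simp only [hqc, if_true]
        rw [ih (c :: cs) hps hd]
        have hq0 : (c :: cs).count q = 0 := by
          refine List.count_eq_zero.2 ?_
          intro hmem
          rcases List.mem_cons.1 hmem with h | h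
          · exact lt_irrefl q (h ▸ hqc)
          · exact lt_irrefl q (lt_of_lt_of_le hqc (List.rel_of_pairwise_cons hd h))
        constructor
        · intro h x
          calc (c :: cs).count x ≤ ps.count x := h x
            _ ≤ (q :: ps).count x := List.count_le_count_cons ..
        · intro h x
          by_cases hxq : x = q
          · subst hxq; rw [hq0]; exact Nat.zero_le _
          · have := h x
            rwa [List.count_cons_of_ne (Ne.symm hxq)] at this
      · by_cases heq : q = c
        · subst heq
          rw [if_neg hqc, if_pos rfl]
          rw [ih cs hps hd.tail]
          constructor
          · intro h x
            by_cases hxq : x = q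
            · subst hxq
              simp only [List.count_cons_self]
              exact Nat.add_le_add_right (h x) 1
            · rw [List.count_cons_of_ne (Ne.symm hxq), List.count_cons_of_ne (Ne.symm hxq)]
              exact h x
          · intro h x
            by_cases hxq : x = q
            · subst hxq
              have := h x
              simp only [List.count_cons_self] at this
              omega
            · have := h x
              rwa [List.count_cons_of_ne (Ne.symm hxq), List.count_cons_of_ne (Ne.symm hxq)] at this
        · have hcq : c < q := lt_of_le_of_ne (not_lt.1 hqc) (fun he => heq he.symm)
          rw [if_neg hqc, if_neg heq]
          simp only [Bool.false_eq_true, false_iff, not_forall, not_le]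
          refine ⟨c, ?_⟩
          have hc0 : (q :: ps).count c = 0 := by
            refine List.count_eq_zero.2 ?_
            intro hmem
            rcases List.mem_cons.1 hmem with h | h
            · exact lt_irrefl c (h ▸ hcq)
            · exact lt_irrefl c (lt_of_lt_of_le hcq (List.rel_of_pairwise_cons hp h))
          rw [hc0]
          simp

-- sprawdzacz_alt answers the same count-domination question (sorting is a permutation).
theorem sprawdzacz_alt_eq_true_iff (pier dr : String) :
    sprawdzacz_alt pier dr = true ↔ ∀ x, dr.toList.count x ≤ pier.toList.count x := by
  unfold sprawdzacz_alt
  have hpp : (PySem.List.sorted pier.toList (fun x => x) false).Pairwise (· ≤ ·) := by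
    simpa using PySem.List.sorted_pairwise pier.toList (fun x => x)
  have hpd : (PySem.List.sorted dr.toList (fun x => x) false).Pairwise (· ≤ ·) := by
    simpa using PySem.List.sorted_pairwise dr.toList (fun x => x)
  rw [sprGo_eq_true_iff _ _ hpp hpd]
  constructor
  · intro h x
    have := h x
    rwa [(PySem.List.sorted_perm dr.toList (fun x => x) false).count_eq,
      (PySem.List.sorted_perm pier.toList (fun x => x) false).count_eq] at this
  · intro h x
    rw [(PySem.List.sorted_perm dr.toList (fun x => x) false).count_eq,
      (PySem.List.sorted_perm pier.toList (fun x => x) false).count_eq]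
    exact h x

-- If every count of dr is dominated by pier's, then dr is no longer than pier.
theorem length_le_of_count_le (xs ys : List Char)
    (h : ∀ c, xs.count c ≤ ys.count c) : xs.length ≤ ys.length := by
  have hle : (↑xs : Multiset Char) ≤ (↑ys : Multiset Char) :=
    Multiset.le_iff_count.2 (by intro a; simpa using h a)
  simpa using Multiset.card_le_card hle

theorem all_congr_mem {α : Type} {l : List α} {p q : α → Bool}
    (h : ∀ x ∈ l, p x = q x) : l.all p = l.all q := by
  induction l with
  | nil => rfl
  | cons a t ih =>
    simp only [List.all_cons, h a (by simp)]
    rw [ih (fun x hx => h x (by simp [hx]))]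

-- A answers exactly the count-domination question (its length test is subsumed).
theorem sprawdzacz_eq_true_iff (pier dr : String) :
    sprawdzacz pier dr = true ↔ ∀ c, dr.toList.count c ≤ pier.toList.count c := by
  unfold sprawdzacz
  simp only [slowoSlownik_eq_counter, PySem.Dict.keys_counter]
  have hall : (PySem.Set.ofList dr.toList).all (fun el =>
      if !(PySem.Dict.counter pier.toList).contains el then false
      else if (PySem.Dict.counter pier.toList).getD el 0 < (PySem.Dict.counter dr.toList).getD el 0 then false
      else true)
    = (PySem.Set.ofList dr.toList).all
        (fun el => decide (dr.toList.count el ≤ pier.toList.count el)) := by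
    apply all_congr_mem
    intro el hel
    have hmem : el ∈ dr.toList := (PySem.Set.mem_ofList dr.toList el).1 hel
    by_cases hc : (PySem.Dict.counter pier.toList).contains el
    · simp only [hc, Bool.not_true, Bool.false_eq_true, if_false, PySem.Dict.getD_counter]
      by_cases hlt : pier.toList.count el < dr.toList.count el
      · have hnle : ¬ (dr.toList.count el ≤ pier.toList.count el) := by omega
        simp [Nat.cast_lt, hlt, hnle]
      · have hle : dr.toList.count el ≤ pier.toList.count el := by omega
        simp [Nat.cast_lt, hlt, hle]
    · have hnot : el ∉ pier.toList := by
        rw [PySem.Dict.contains_counter] at hc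
        simpa using hc
      have h0 : pier.toList.count el = 0 := List.count_eq_zero.2 hnot
      have h1 : 0 < dr.toList.count el := List.count_pos_iff.2 hmem
      have hnle : ¬ (dr.toList.count el ≤ pier.toList.count el) := by omega
      simp [hc, hnle]
  by_cases hlen : PySem.Str.len pier < PySem.Str.len dr
  · simp only [hlen, if_true, Bool.false_eq_true, false_iff, not_forall, not_le]
    have hlt : pier.toList.length < dr.toList.length := by
      simpa [PySem.Str.len_eq] using hlen
    by_contra hcon
    push Not at hcon
    exact absurd (length_le_of_count_le dr.toList pier.toList (fun c => hcon c)) (by omega)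
  · simp only [hlen, if_false, hall, List.all_eq_true]
    constructor
    · intro h c
      by_cases hmem : c ∈ dr.toList
      · simpa using h c ((PySem.Set.mem_ofList dr.toList c).2 hmem)
      · simp [List.count_eq_zero.2 hmem]
    · intro h el _
      simpa using h el

-- ===== VERDICT (by name: the statement is the Claim_ definition above) =====
theorem sprawdzacz_spec : Claim_equal_sprawdzacz := by
  intro pier dr _
  unfold Spec_sprawdzacz
  have hA := sprawdzacz_eq_true_iff pier dr
  have hB := sprawdzacz_alt_eq_true_iff pier dr
  cases ha : sprawdzacz pier dr
  · cases hb : sprawdzacz_alt pier dr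
    · rfl
    · exact absurd (hA.2 (hB.1 hb)) (by simp [ha])
  · exact (hB.2 (hA.1 ha)).symm
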